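-- pv_equiv track=rewrite | github.com/OzYossarian/Kandel | main/codes/hexagonal/tic_tac_toe/TicTacToeCode.py | follows_tic_tac_toe_rules
-- ===== SOURCE A (Python) =====
-- def follows_tic_tac_toe_rules(tic_tac_toe_route):
--     """Tic-tac-toe rules state that the type of edges measured at each
--     timestep must differ in column and row from those measured at the
--     previous timestep.
--     """
--     length = len(tic_tac_toe_route)
--     valid = length > 0
--     if valid:
--         this_colour, this_letter = tic_tac_toe_route[0]
--     else:
--         this_colour, this_letter = (None, None)
--     i = 0
--     while valid and i < length:
--         next_colour, next_letter = tic_tac_toe_route[(i + 1) % length]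
--         valid = this_colour != next_colour and this_letter != next_letter
--         this_colour = next_colour
--         this_letter = next_letter
--         i += 1
--     return valid
-- ===== SOURCE B (Python) =====
-- def follows_tic_tac_toe_rules(tic_tac_toe_route):
--     """Structural recursion down the list: compare each element with its
--     successor, closing the cycle against the remembered first element.
--     No indices, no length, no modular arithmetic; empty route is invalid."""
--     if not tic_tac_toe_route:
--         return False
--     first = tic_tac_toe_route[0]
--
--     def differs(p, q):
--         return p[0] != q[0] and p[1] != q[1]
--
--     def ok(pair, rest):
--         if not rest:
--             return differs(pair, first)
--         return differs(pair, rest[0]) and ok(rest[0], rest[1:])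
--
--     return ok(first, tic_tac_toe_route[1:])
-- ===== Notes on version B (the rewrite author's own statement) =====
-- stated objective: alternative
-- what changed: Replaces A's index/modulo while-loop carrying (valid, this_colour, this_letter) mutable state with a pure structural recursion down the list that compares each element to its successor and closes the cycle against the remembered first element, using no indices, length or modular arithmetic.
import Mathlib
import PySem

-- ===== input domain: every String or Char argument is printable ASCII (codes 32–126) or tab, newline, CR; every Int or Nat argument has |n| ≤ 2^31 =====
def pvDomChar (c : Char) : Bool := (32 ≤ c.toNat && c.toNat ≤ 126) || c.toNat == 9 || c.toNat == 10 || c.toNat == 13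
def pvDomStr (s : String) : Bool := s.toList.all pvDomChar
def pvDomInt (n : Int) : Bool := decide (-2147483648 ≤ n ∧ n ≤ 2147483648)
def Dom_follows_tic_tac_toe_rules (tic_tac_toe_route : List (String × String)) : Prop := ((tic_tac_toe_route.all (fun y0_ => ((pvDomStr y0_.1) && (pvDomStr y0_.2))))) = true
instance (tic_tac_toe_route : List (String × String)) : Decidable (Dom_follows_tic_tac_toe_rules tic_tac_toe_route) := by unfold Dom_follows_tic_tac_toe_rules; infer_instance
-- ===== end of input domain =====

-- B replaces A's index/modulo while-loop with a pure structural recursion down the list,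
-- closing the cycle against the remembered first element (alternative decomposition).


-- ===== PORT A =====
-- A's while loop: carries (this_colour, this_letter) and index i; exits early on a failed check.
def ttcLoopA (route : List (String × String)) (n : Nat) (thisC thisL : String) (i : Nat) :
    Bool :=
  if _h : i < n then
    if thisC ≠ (route.getD ((i + 1) % n) ("", "")).1
        ∧ thisL ≠ (route.getD ((i + 1) % n) ("", "")).2 then
      ttcLoopA route n (route.getD ((i + 1) % n) ("", "")).1
        (route.getD ((i + 1) % n) ("", "")).2 (i + 1)
    else
      false
  else
    true
termination_by n - i

def follows_tic_tac_toe_rules (tic_tac_toe_route : List (String × String)) : Bool :=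
  let length := tic_tac_toe_route.length
  if 0 < length then
    ttcLoopA tic_tac_toe_route length
      (tic_tac_toe_route.getD 0 ("", "")).1 (tic_tac_toe_route.getD 0 ("", "")).2 0
  else
    false

-- ===== PORT B =====
-- Source B's `differs(p, q)`
def ttcDiffers (p q : String × String) : Bool :=
  decide (p.1 ≠ q.1) && decide (p.2 ≠ q.2)

-- Source B's recursive `ok(pair, rest)` with the closed-over `first`
def ttcOkB (first pair : String × String) (rest : List (String × String)) : Bool :=
  match rest with
  | [] => ttcDiffers pair first
  | q :: t => ttcDiffers pair q && ttcOkB first q t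

def follows_tic_tac_toe_rules_alt (tic_tac_toe_route : List (String × String)) : Bool :=
  match tic_tac_toe_route with
  | [] => false
  | p :: rest => ttcOkB p p rest

-- ===== PRECONDITION & SPEC =====
def Spec_follows_tic_tac_toe_rules (tic_tac_toe_route : List (String × String)) (out : Bool) : Prop := out = follows_tic_tac_toe_rules_alt tic_tac_toe_route
instance (tic_tac_toe_route : List (String × String)) (out : Bool) : Decidable (Spec_follows_tic_tac_toe_rules tic_tac_toe_route out) := by unfold Spec_follows_tic_tac_toe_rules; infer_instance

-- ===== CLAIM (what is proved, stated in full; the proofs are below) =====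
def Claim_equal_follows_tic_tac_toe_rules : Prop := ∀ (tic_tac_toe_route : List (String × String)), Dom_follows_tic_tac_toe_rules tic_tac_toe_route → Spec_follows_tic_tac_toe_rules tic_tac_toe_route (follows_tic_tac_toe_rules tic_tac_toe_route)

-- ===== LEMMAS AND PROOFS =====

-- the per-index check A performs at step j (this = route[j % n], next = route[(j+1) % n])
def ttcCheck (route : List (String × String)) (j : Nat) : Bool :=
  decide ((route.getD (j % route.length) ("", "")).1 ≠ (route.getD ((j + 1) % route.length) ("", "")).1
    ∧ (route.getD (j % route.length) ("", "")).2 ≠ (route.getD ((j + 1) % route.length) ("", "")).2)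

-- A's loop, started at index i with this = route[i % n], computes the conjunction
-- of ttcCheck over the remaining indices i, i+1, …, n-1.
lemma ttcLoopA_eq (route : List (String × String)) :
    ∀ (k i : Nat), i + k = route.length →
      ttcLoopA route route.length
        ((route.getD (i % route.length) ("", "")).1)
        ((route.getD (i % route.length) ("", "")).2) i
      = (List.range' i k).all (ttcCheck route) := by
  intro k
  induction k with
  | zero =>
    intro i hi
    have hge : ¬ i < route.length := by omega
    rw [ttcLoopA, dif_neg hge]
    simp
  | succ k ih =>
    intro i hi
    have hlt : i < route.length := by omega
    rw [ttcLoopA, dif_pos hlt, List.range'_succ, List.all_cons]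
    by_cases hc : (route.getD (i % route.length) ("", "")).1 ≠ (route.getD ((i + 1) % route.length) ("", "")).1
        ∧ (route.getD (i % route.length) ("", "")).2 ≠ (route.getD ((i + 1) % route.length) ("", "")).2
    · rw [if_pos hc, ih (i + 1) (by omega)]
      have hck : ttcCheck route i = true := by
        simp only [ttcCheck, decide_eq_true_iff]
        exact hc
      rw [hck, Bool.true_and]
    · rw [if_neg hc]
      have hck : ttcCheck route i = false := by
        simp only [ttcCheck, decide_eq_false_iff_not]
        exact hc
      rw [hck, Bool.false_and]

-- B's recursion, positioned at element i with the tail drop (i+1), computes the same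
-- conjunction of ttcCheck over the remaining indices i, i+1, …, n-1.
lemma ttcOkB_eq (route : List (String × String)) :
    ∀ (k i : Nat), i + (k + 1) = route.length →
      ttcOkB (route.getD 0 ("", "")) (route.getD i ("", "")) (route.drop (i + 1))
      = (List.range' i (k + 1)).all (ttcCheck route) := by
  intro k
  induction k with
  | zero =>
    intro i hi
    have hdrop : route.drop (i + 1) = [] := by
      apply List.drop_eq_nil_of_le; omega
    have hlt : i < route.length := by omega
    have hmi : i % route.length = i := Nat.mod_eq_of_lt hlt
    have hmn : (i + 1) % route.length = 0 := by
      rw [hi]; exact Nat.mod_self _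
    rw [hdrop]
    simp only [ttcOkB, ttcDiffers, List.range'_succ, List.range'_zero, List.all_cons,
      List.all_nil, Bool.and_true, ttcCheck, hmi, hmn, Bool.decide_and]
  | succ k ih =>
    intro i hi
    have hlt1 : i + 1 < route.length := by omega
    have hlt : i < route.length := by omega
    have hdrop : route.drop (i + 1) = route[i + 1] :: route.drop (i + 2) :=
      List.drop_eq_getElem_cons hlt1
    have hget : route.getD (i + 1) ("", "") = route[i + 1] := by
      simp [List.getD, hlt1]
    have hmi : i % route.length = i := Nat.mod_eq_of_lt hlt
    have hmi1 : (i + 1) % route.length = i + 1 := Nat.mod_eq_of_lt hlt1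
    rw [hdrop]
    show (ttcDiffers (route.getD i ("", "")) route[i + 1]
        && ttcOkB (route.getD 0 ("", "")) route[i + 1] (route.drop (i + 2))) = _
    rw [← hget, ih (i + 1) (by omega), List.range'_succ, List.all_cons]
    congr 1
    simp only [ttcDiffers, ttcCheck, hmi, hmi1, Bool.decide_and]

-- ===== VERDICT (by name: the statement is the Claim_ definition above) =====
theorem follows_tic_tac_toe_rules_spec : Claim_equal_follows_tic_tac_toe_rules := by
  intro route _
  show follows_tic_tac_toe_rules route = follows_tic_tac_toe_rules_alt route
  match route with
  | [] => rfl
  | (p :: rest) =>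
    have hpos : 0 < (p :: rest).length := by simp
    have hA : follows_tic_tac_toe_rules (p :: rest)
        = (List.range' 0 (p :: rest).length).all (ttcCheck (p :: rest)) := by
      have h := ttcLoopA_eq (p :: rest) (p :: rest).length 0 (by omega)
      rw [Nat.zero_mod] at h
      simp only [follows_tic_tac_toe_rules, if_pos hpos]
      exact h
    have hB := ttcOkB_eq (p :: rest) rest.length 0 (by simp)
    simp only [List.drop_succ_cons, List.drop_zero, List.getD_cons_zero] at hB
    rw [hA]
    show _ = ttcOkB p p rest
    rw [hB]
    simp
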